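-- pv_equiv track=rewrite | github.com/tekinmuhammed/LeetCode-Solves | Daily Challenges/Daily-Challenges-Jan-5-2026-solution.py | maxMatrixSum
-- ===== SOURCE A (Python) =====
-- def maxMatrixSum(matrix):
--     total = 0
--     neg_count = 0
--     min_abs = float('inf')
--
--     for row in matrix:
--         for val in row:
--             if val < 0:
--                 neg_count += 1
--             total += abs(val)
--             min_abs = min(min_abs, abs(val))
--
--     if neg_count % 2 == 1:
--         total -= 2 * min_abs
--
--     return total
-- ===== SOURCE B (Python) =====
-- def maxMatrixSum(matrix):
--     # Dynamic programming over keep/flip decisions: `even` (resp. `odd`) is the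
--     # maximum signed sum achievable over the values seen so far using an even
--     # (resp. odd) number of sign flips; pair flips make exactly the even-flip
--     # configurations reachable (a flipped zero absorbs parity for free, which
--     # the max over both transitions captures automatically).
--     even, odd = 0, None
--     for row in matrix:
--         for val in row:
--             if odd is None:
--                 even, odd = even + val, even - val
--             else:
--                 even, odd = max(even + val, odd - val), max(odd + val, even - val)
--     return even
-- ===== Notes on version B (the rewrite author's own statement) =====
-- stated objective: alternative
-- what changed: Replaces A's aggregate bookkeeping (sum of absolute values, negative count, running minimum absolute value with a final parity correction) by a dynamic program over keep/flip decisions that tracks the maximum signed sum achievable with an even and with an odd number of sign flips and returns the even-parity optimum.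
import Mathlib
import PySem

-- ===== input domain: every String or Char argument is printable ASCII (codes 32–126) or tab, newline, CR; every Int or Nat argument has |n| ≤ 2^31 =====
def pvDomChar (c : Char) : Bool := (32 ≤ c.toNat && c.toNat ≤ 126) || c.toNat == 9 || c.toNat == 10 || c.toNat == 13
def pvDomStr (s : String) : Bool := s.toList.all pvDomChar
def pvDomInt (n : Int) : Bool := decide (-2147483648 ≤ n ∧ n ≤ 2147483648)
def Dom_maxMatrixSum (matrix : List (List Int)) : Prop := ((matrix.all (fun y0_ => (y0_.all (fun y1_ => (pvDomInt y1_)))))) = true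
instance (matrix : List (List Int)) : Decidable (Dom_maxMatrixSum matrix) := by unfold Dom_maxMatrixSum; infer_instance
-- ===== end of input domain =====

-- B replaces A's aggregate bookkeeping (abs-sum, negative count, running min with a final
-- parity correction) by a dynamic program over keep/flip decisions tracking the best signed
-- sum with an even and with an odd number of flips (objective: alternative).

-- ===== PORT A =====
-- state = (total, neg_count, min_abs); Python's min_abs = float('inf') is modelled as `none`
-- (the odd-parity branch only fires after at least one value was seen, so `none` never
-- reaches the subtraction; `getD 0` there is unreachable).
def pvStepA (s : Int × Int × Option Int) (v : Int) : Int × Int × Option Int :=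
  (s.1 + |v|,
   (if v < 0 then s.2.1 + 1 else s.2.1),
   some (match s.2.2 with | none => |v| | some m => min m |v|))

def maxMatrixSum (matrix : List (List Int)) : Int :=
  let s := matrix.foldl (fun s row => row.foldl pvStepA s) (0, 0, (none : Option Int))
  if s.2.1 % 2 == 1 then s.1 - 2 * s.2.2.getD 0 else s.1

-- ===== PORT B =====
-- state = (even, odd): best signed sum with an even / odd number of sign flips so far;
-- Python's `odd = None` before the first value is modelled as `none`.
def pvStepB (s : Int × Option Int) (v : Int) : Int × Option Int :=
  match s.2 with
  | none => (s.1 + v, some (s.1 - v))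
  | some o => (max (s.1 + v) (o - v), some (max (o + v) (s.1 - v)))

def maxMatrixSum_alt (matrix : List (List Int)) : Int :=
  (matrix.foldl (fun s row => row.foldl pvStepB s) (0, (none : Option Int))).1

-- ===== PRECONDITION & SPEC =====
def Spec_maxMatrixSum (matrix : List (List Int)) (out : Int) : Prop := out = maxMatrixSum_alt matrix
instance (matrix : List (List Int)) (out : Int) : Decidable (Spec_maxMatrixSum matrix out) := by unfold Spec_maxMatrixSum; infer_instance

-- ===== CLAIM (what is proved, stated in full; the proofs are below) =====
def Claim_equal_maxMatrixSum : Prop := ∀ (matrix : List (List Int)), Dom_maxMatrixSum matrix → Spec_maxMatrixSum matrix (maxMatrixSum matrix)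

-- ===== LEMMAS AND PROOFS =====

-- each nested fold over rows equals one fold over the flattened list
theorem pv_flattenA (matrix : List (List Int)) (s : Int × Int × Option Int) :
    matrix.foldl (fun s row => row.foldl pvStepA s) s
      = (matrix.flatMap (fun row => row)).foldl pvStepA s := by
  induction matrix generalizing s with
  | nil => rfl
  | cons r t ih => simp [List.flatMap_cons, List.foldl_append, ih]

theorem pv_flattenB (matrix : List (List Int)) (s : Int × Option Int) :
    matrix.foldl (fun s row => row.foldl pvStepB s) s
      = (matrix.flatMap (fun row => row)).foldl pvStepB s := by
  induction matrix generalizing s with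
  | nil => rfl
  | cons r t ih => simp [List.flatMap_cons, List.foldl_append, ih]

-- coupling invariant: once one value is seen, B's (even, odd) are A's aggregates with the
-- parity penalty applied to the even resp. odd parity class
theorem pv_couple (l : List Int) : ∀ (t c m : Int), 0 ≤ m →
    l.foldl pvStepB (t - (if c % 2 = 0 then 0 else 2 * m),
                     some (t - (if c % 2 = 0 then 2 * m else 0)))
      = (let s := l.foldl pvStepA (t, c, some m)
         (s.1 - (if s.2.1 % 2 = 0 then 0 else 2 * s.2.2.getD 0),
          some (s.1 - (if s.2.1 % 2 = 0 then 2 * s.2.2.getD 0 else 0)))) := by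
  induction l with
  | nil => intro t c m hm; rfl
  | cons v tl ih =>
      intro t c m hm
      simp only [List.foldl_cons, pvStepA, pvStepB]
      have hv0 : (0:Int) ≤ |v| := abs_nonneg v
      have h1 : max ((t - (if c % 2 = 0 then 0 else 2 * m)) + v)
                    ((t - (if c % 2 = 0 then 2 * m else 0)) - v)
          = (t + |v|) - (if (if v < 0 then c + 1 else c) % 2 = 0 then 0
                         else 2 * min m |v|) := by
        rcases lt_or_ge v 0 with hv | hv
        · rw [abs_of_neg hv]; split_ifs <;> omega
        · rw [abs_of_nonneg hv]; split_ifs <;> omega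
      have h2 : max ((t - (if c % 2 = 0 then 2 * m else 0)) + v)
                    ((t - (if c % 2 = 0 then 0 else 2 * m)) - v)
          = (t + |v|) - (if (if v < 0 then c + 1 else c) % 2 = 0 then 2 * min m |v|
                         else 0) := by
        rcases lt_or_ge v 0 with hv | hv
        · rw [abs_of_neg hv]; split_ifs <;> omega
        · rw [abs_of_nonneg hv]; split_ifs <;> omega
      rw [h1, h2]
      exact ih (t + |v|) (if v < 0 then c + 1 else c) (min m |v|) (le_min hm hv0)

-- ===== VERDICT (by name: the statement is the Claim_ definition above) =====
theorem maxMatrixSum_spec : Claim_equal_maxMatrixSum := by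
  intro matrix _
  show maxMatrixSum matrix = maxMatrixSum_alt matrix
  unfold maxMatrixSum maxMatrixSum_alt
  rw [pv_flattenA, pv_flattenB]
  cases h : matrix.flatMap (fun row => row) with
  | nil => rfl
  | cons v l =>
      simp only [List.foldl_cons, pvStepA, pvStepB]
      have hfirst :
          ((0:Int) + v, some ((0:Int) - v))
            = (((0:Int) + |v|) - (if (if v < 0 then (0:Int) + 1 else 0) % 2 = 0 then 0
                            else 2 * |v|),
               some (((0:Int) + |v|) - (if (if v < 0 then (0:Int) + 1 else 0) % 2 = 0 then 2 * |v|
                                  else 0))) := by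
        rcases lt_or_ge v 0 with hv | hv
        · rw [abs_of_neg hv]
          simp only [Prod.mk.injEq, Option.some.injEq]
          constructor <;> (split_ifs <;> omega)
        · rw [abs_of_nonneg hv]
          simp only [Prod.mk.injEq, Option.some.injEq]
          constructor <;> (split_ifs <;> omega)
      rw [hfirst,
        pv_couple l (0 + |v|) (if v < 0 then (0:Int) + 1 else 0) |v| (abs_nonneg v)]
      simp only [beq_iff_eq]
      split_ifs <;> omega
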